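-- pv_equiv track=rewrite | github.com/k-harada/AtCoder | other_contests/PAST202005/K.py | solve
-- ===== SOURCE A (Python) =====
-- def solve(n, q, query_list):
--     tables_top = [i for i in range(n + 1)]
--     parent = [-i for i in range(n + 1)]
--     for f, t, x in query_list:
--         tables_top[t], tables_top[f], parent[x] = tables_top[f], parent[x], tables_top[t]
--
--     res_list = [i for i in range(n + 1)]
--     for i in range(1, n + 1):
--         p = tables_top[i]
--         while p > 0:
--             res_list[p] = i
--             p = parent[p]
--
--     return res_list[1:]
-- ===== SOURCE B (Python) =====
-- def solve(n, q, query_list):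
--     top = list(range(n + 1))
--     below = [-i for i in range(n + 1)]
--     for f, t, x in query_list:
--         top[t], top[f], below[x] = top[f], below[x], top[t]
--     # Every positive value appears exactly once among top[0..n] and below[0..n]
--     # (each query merely rotates three stored values), so the pointers can be
--     # inverted into two lookup tables: top_table[v] = the table whose pile has
--     # v on top, carrier[v] = the element resting directly on v.  Each element's
--     # final table is then found by climbing upward from it to the top of its
--     # pile, instead of tracing every pile downward from its top.
--     top_table = {}
--     carrier = {}
--     for i in range(1, n + 1):
--         if top[i] > 0:
--             top_table[top[i]] = i
--         if below[i] > 0: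
--             carrier[below[i]] = i
--     res = []
--     for e in range(1, n + 1):
--         c = e
--         for _ in range(n):  # a pile holds at most n boxes
--             if c in top_table or c not in carrier:
--                 break
--             c = carrier[c]
--         res.append(top_table.get(c, e))
--     return res
-- ===== Notes on version B (the rewrite author's own statement) =====
-- stated objective: alternative
-- what changed: B inverts the final pointer arrays into who-is-on-top-of-whom lookup tables (top_table, carrier) and finds each element's label by climbing upward from the element to the top of its own pile, instead of A's tracing every pile downward from its top while stamping labels; B's answer list is built per element, not by in-place stamping.
import Mathlib
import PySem

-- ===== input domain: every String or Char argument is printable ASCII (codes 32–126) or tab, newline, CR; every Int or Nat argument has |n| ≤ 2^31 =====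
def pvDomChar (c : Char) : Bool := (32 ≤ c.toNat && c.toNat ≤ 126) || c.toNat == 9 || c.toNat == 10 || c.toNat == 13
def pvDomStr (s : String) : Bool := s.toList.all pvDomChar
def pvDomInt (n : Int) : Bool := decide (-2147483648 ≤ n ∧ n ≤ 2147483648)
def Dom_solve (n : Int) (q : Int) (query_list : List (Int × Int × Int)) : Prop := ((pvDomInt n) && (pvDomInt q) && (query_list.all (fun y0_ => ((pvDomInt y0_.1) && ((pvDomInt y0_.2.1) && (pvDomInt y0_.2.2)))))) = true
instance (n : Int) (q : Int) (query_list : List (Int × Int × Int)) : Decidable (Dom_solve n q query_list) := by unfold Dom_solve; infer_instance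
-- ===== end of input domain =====

-- B inverts the final pointer maps into who-is-on-top-of-whom lookup tables and finds each
-- element's label by climbing upward to the top of its own pile, instead of tracing every
-- pile downward from its top; an alternative of similar cost.

-- ===== PORT A =====
-- one query: the simultaneous assignment 'tables_top[t], tables_top[f], parent[x] = tables_top[f], parent[x], tables_top[t]';
-- Option-threaded: `none` exactly where the Python raises IndexError.
def solveStepA (s : Option (List Int × List Int)) (qr : Int × Int × Int) : Option (List Int × List Int) :=
  s.bind (fun st =>
    (PySem.List.pyGet? st.1 qr.1).bind (fun vf =>
    (PySem.List.pyGet? st.2 qr.2.2).bind (fun px =>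
    (PySem.List.pyGet? st.1 qr.2.1).bind (fun vt =>
    (PySem.List.pySet? st.1 qr.2.1 vf).bind (fun top1 =>
    (PySem.List.pySet? top1 qr.1 px).bind (fun top2 =>
    (PySem.List.pySet? st.2 qr.2.2 vt).bind (fun par1 => some (top2, par1))))))))

-- the inner 'while p > 0: res_list[p] = i; p = parent[p]'; the fuel only makes the recursion structural
def solveWhileA (par : List Int) (i : Int) : Nat → List Int → Int → Option (List Int)
  | 0, _, _ => none
  | fuel+1, res, p =>
    if 0 < p then
      match PySem.List.pySet? res p i, PySem.List.pyGet? par p with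
      | some res', some p' => solveWhileA par i fuel res' p'
      | _, _ => none
    else some res

-- body of 'for i in range(1, n + 1)'
def solveExtrA (top par : List Int) (s : Option (List Int)) (i : Int) : Option (List Int) :=
  s.bind (fun res =>
    (PySem.List.pyGet? top i).bind (fun p => solveWhileA par i (par.length + 1) res p))

def solve (n : Int) (q : Int) (query_list : List (Int × Int × Int)) : List Int :=
  let top0 := PySem.List.pyRange 0 (n + 1) 1
  let par0 := (PySem.List.pyRange 0 (n + 1) 1).map (fun i => -i)
  match query_list.foldl solveStepA (some (top0, par0)) with
  | none => []
  | some (top, par) =>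
    match (PySem.List.pyRange 1 (n + 1) 1).foldl (solveExtrA top par) (some (PySem.List.pyRange 0 (n + 1) 1)) with
    | none => []
    | some res => PySem.List.slice res (some 1) none

-- ===== PORT B =====
-- Source B's first loop is the same simultaneous pointer rotation as A's, so its port reuses solveStepA
-- 'if top[i] > 0: top_table[top[i]] = i' / 'if below[i] > 0: carrier[below[i]] = i'
def solveInvB (top below : List Int) (s : Option (PySem.Dict Int Int × PySem.Dict Int Int)) (i : Int) :
    Option (PySem.Dict Int Int × PySem.Dict Int Int) :=
  s.bind (fun d =>
    (PySem.List.pyGet? top i).bind (fun tv =>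
    (PySem.List.pyGet? below i).bind (fun bv =>
      some ((if 0 < tv then d.1.insert tv i else d.1),
            (if 0 < bv then d.2.insert bv i else d.2)))))

-- 'for _ in range(n): if c in top_table or c not in carrier: break; c = carrier[c]'
def climbB (tt ca : PySem.Dict Int Int) : Nat → Int → Int
  | 0, c => c
  | fuel+1, c =>
    if tt.contains c then c
    else
      match ca.get? c with
      | none => c
      | some p => climbB tt ca fuel p

def solve_alt (n : Int) (q : Int) (query_list : List (Int × Int × Int)) : List Int :=
  let top0 := PySem.List.pyRange 0 (n + 1) 1
  let below0 := (PySem.List.pyRange 0 (n + 1) 1).map (fun i => -i)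
  match query_list.foldl solveStepA (some (top0, below0)) with
  | none => []
  | some (top, below) =>
    match (PySem.List.pyRange 1 (n + 1) 1).foldl (solveInvB top below) (some (PySem.Dict.empty, PySem.Dict.empty)) with
    | none => []
    | some (tt, ca) =>
      (PySem.List.pyRange 1 (n + 1) 1).map (fun e => tt.getD (climbB tt ca n.toNat e) e)

-- ===== PRECONDITION & SPEC =====
-- Pre_ admits exactly the inputs on which A's list indexing is legal (Python allows an index of a
-- length-(n+1) list between -(n+1) and n, wrapping negatives); outside it A raises IndexError.
def Pre_solve (n : Int) (q : Int) (query_list : List (Int × Int × Int)) : Prop :=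
  ∀ p ∈ query_list, (-(n + 1) ≤ p.1 ∧ p.1 ≤ n) ∧ (-(n + 1) ≤ p.2.1 ∧ p.2.1 ≤ n) ∧
    (-(n + 1) ≤ p.2.2 ∧ p.2.2 ≤ n)

instance (n : Int) (q : Int) (query_list : List (Int × Int × Int)) : Decidable (Pre_solve n q query_list) := by unfold Pre_solve; infer_instance

def pvWitness_solve : Int × Int × (List (Int × Int × Int)) := (2, 1, [(1, 2, 1)])

def Spec_solve (n : Int) (q : Int) (query_list : List (Int × Int × Int)) (out : List Int) : Prop := out = solve_alt n q query_list
instance (n : Int) (q : Int) (query_list : List (Int × Int × Int)) (out : List Int) : Decidable (Spec_solve n q query_list out) := by unfold Spec_solve; infer_instance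

-- ===== CLAIM (what is proved, stated in full; the proofs are below) =====
def Claim_equal_solve : Prop := ∀ (n : Int) (q : Int) (query_list : List (Int × Int × Int)), Dom_solve n q query_list → Pre_solve n q query_list → Spec_solve n q query_list (solve n q query_list)

-- ===== LEMMAS AND PROOFS =====

-- the labels 0..N-1 as a list of Ints
def pvL (N : Nat) : List Int := (List.range N).map (fun k : Nat => (k : Int))

-- iterated descent: the cell m steps below the cell s (following the final `below` pointers)
def pvDown (below : List Int) : Nat → Int → Int
  | 0, c => c
  | m+1, c => pvDown below m (below.getD c.toNat 0)

-- the pointer-state invariant: lengths, and each positive value is stored in EXACTLY ONE slot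
def pvInv (N : Nat) (top below : List Int) : Prop :=
  top.length = N ∧ below.length = N ∧
  ∀ v : Int, 0 < v → top.count v + below.count v = if v < (N : Int) then 1 else 0

-- element e lies on the pile of table i (reachable from i's top by descending, all cells positive)
def pvOn (N : Nat) (top below : List Int) (i e : Int) : Prop :=
  1 ≤ i ∧ i < (N : Int) ∧ ∃ m : Nat,
    (∀ k ≤ m, 0 < pvDown below k (top.getD i.toNat 0)) ∧
    pvDown below m (top.getD i.toNat 0) = e

-- characterizations of B's two inverse lookup tables
def pvHtt (N : Nat) (top : List Int) (tt : PySem.Dict Int Int) : Prop :=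
  ∀ v j : Int, tt.get? v = some j ↔ (0 < v ∧ 1 ≤ j ∧ j < (N : Int) ∧ top.getD j.toNat 0 = v)

def pvHca (N : Nat) (below : List Int) (ca : PySem.Dict Int Int) : Prop :=
  ∀ v p : Int, ca.get? v = some p ↔ (0 < v ∧ 1 ≤ p ∧ p < (N : Int) ∧ below.getD p.toNat 0 = v)

lemma pv_getD_set_self {α : Type} {l : List α} {k : Nat} (h : k < l.length) (v d : α) :
    (l.set k v).getD k d = v := by
  simp [List.getD_eq_getElem?_getD, h]

lemma pv_getD_set_ne {α : Type} {l : List α} {k j : Nat} (h : k ≠ j) (v d : α) :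
    (l.set k v).getD j d = l.getD j d := by
  simp [List.getD_eq_getElem?_getD, List.getElem?_set_ne h]

lemma pv_pyGet {xs : List Int} {i : Int} (h0 : 0 ≤ i) (h : i.toNat < xs.length) (d : Int) :
    PySem.List.pyGet? xs i = some (xs.getD i.toNat d) := by
  rw [PySem.List.pyGet?_of_nonneg _ h0, List.getElem?_eq_getElem h, List.getD_eq_getElem _ _ h]

lemma pv_pySet {α : Type} {xs : List α} {i : Int} (h0 : 0 ≤ i) (h : i.toNat < xs.length) (v : α) :
    PySem.List.pySet? xs i v = some (xs.set i.toNat v) := by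
  have hi : i = ((i.toNat : Nat) : Int) := (Int.toNat_of_nonneg h0).symm
  rw [hi]
  exact PySem.List.pySet?_natCast xs i.toNat v h

lemma pv_mod_small {c : Int} {N : Nat} (h1 : 0 ≤ c) (h2 : c < (N : Int)) :
    PySem.Int.mod c (N : Int) = c := by
  rw [PySem.Int.mod_eq_emod_of_pos (by omega)]
  exact Int.emod_eq_of_lt h1 h2

lemma pv_mod_neg {c : Int} {N : Nat} (h1 : -(N : Int) ≤ c) (h2 : c < 0) :
    PySem.Int.mod c (N : Int) = (N : Int) + c := by
  rw [PySem.Int.mod_eq_emod_of_pos (by omega)]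
  calc c % (N : Int) = (c + N) % (N : Int) := Int.emod_eq_add_self_emod
    _ = c + N := Int.emod_eq_of_lt (by omega) (by omega)
    _ = (N : Int) + c := by ring

lemma pv_mod_bounds {c : Int} {N : Nat} (h0 : 0 < N) (h1 : -(N : Int) ≤ c) (h2 : c < (N : Int)) :
    0 ≤ PySem.Int.mod c (N : Int) ∧ PySem.Int.mod c (N : Int) < (N : Int) := by
  by_cases hc : 0 ≤ c
  · rw [pv_mod_small hc h2]; omega
  · rw [pv_mod_neg h1 (by omega)]; omega

lemma pv_idx_wrap {N : Nat} {c : Int} (h0 : 0 < N) (h1 : -(N : Int) ≤ c) (h2 : c < (N : Int)) :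
    PySem.List.pyIdx? N c = some (PySem.Int.mod c (N : Int)).toNat := by
  by_cases hc : 0 ≤ c
  · rw [pv_mod_small hc h2]
    simp [PySem.List.pyIdx?, hc, h2]
  · rw [pv_mod_neg h1 (by omega)]
    simp only [PySem.List.pyIdx?, if_neg hc, if_pos h1]
    congr 1
    omega

lemma pv_pyGet_wrap {xs : List Int} {N : Nat} {c : Int} (hlen : xs.length = N) (h0 : 0 < N)
    (h1 : -(N : Int) ≤ c) (h2 : c < (N : Int)) (d : Int) :
    PySem.List.pyGet? xs c = some (xs.getD (PySem.Int.mod c (N : Int)).toNat d) := by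
  have hb := pv_mod_bounds h0 h1 h2
  have hk : (PySem.Int.mod c (N : Int)).toNat < xs.length := by omega
  simp only [PySem.List.pyGet?, hlen, pv_idx_wrap h0 h1 h2, Option.bind_some]
  rw [List.getElem?_eq_getElem hk, List.getD_eq_getElem _ _ hk]

lemma pv_pySet_wrap {xs : List Int} {N : Nat} {c : Int} (hlen : xs.length = N) (h0 : 0 < N)
    (h1 : -(N : Int) ≤ c) (h2 : c < (N : Int)) (v : Int) :
    PySem.List.pySet? xs c v = some (xs.set (PySem.Int.mod c (N : Int)).toNat v) := by
  simp only [PySem.List.pySet?, hlen, pv_idx_wrap h0 h1 h2, Option.map_some]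

lemma pv_getD_pvL {N i : Nat} (hi : i < N) (d : Int) : (pvL N).getD i d = (i : Int) := by
  have hlen : i < (pvL N).length := by simp [pvL]; omega
  rw [List.getD_eq_getElem _ _ hlen]
  simp [pvL]

lemma pv_range_eq {n : Int} (hn : 0 ≤ n) :
    PySem.List.pyRange 0 (n + 1) 1 = pvL (n + 1).toNat := by
  rw [PySem.List.pyRange_one, pvL]
  have h2 : (n + 1 - 0).toNat = (n + 1).toNat := by omega
  rw [h2]
  refine List.map_congr_left ?_
  intro k _
  omega

lemma pv_down_succ (below : List Int) (m : Nat) (s : Int) :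
    pvDown below (m + 1) s = below.getD (pvDown below m s).toNat 0 := by
  induction m generalizing s with
  | zero => rfl
  | succ m ih => exact ih (below.getD s.toNat 0)

-- ===== counting =====

lemma pv_count_set (l : List Int) (i : Nat) (v w : Int) (h : i < l.length) :
    ((l.set i v).count w) + (if l.getD i 0 = w then 1 else 0)
      = l.count w + (if v = w then 1 else 0) := by
  induction l generalizing i with
  | nil => simp at h
  | cons a l ih =>
      cases i with
      | zero =>
          simp only [List.set_cons_zero, List.count_cons, List.getD_cons_zero, beq_iff_eq]
          split_ifs <;> omega
      | succ i =>
          have h' : i < l.length := by simpa using h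
          have hih := ih i h'
          simp only [List.set_cons_succ, List.count_cons, List.getD_cons_succ, beq_iff_eq]
          split_ifs at hih ⊢ <;> omega

lemma pv_count_pos (l : List Int) (k : Nat) (h : k < l.length) : 1 ≤ l.count (l.getD k 0) := by
  have hmem : l.getD k 0 ∈ l := by
    rw [List.getD_eq_getElem _ _ h]
    exact List.getElem_mem h
  have := List.count_pos_iff.mpr hmem
  omega

lemma pv_two_le_count (l : List Int) (i j : Nat) (hi : i < l.length) (hj : j < l.length)
    (hne : i ≠ j) (h : l.getD i 0 = l.getD j 0) : 2 ≤ l.count (l.getD i 0) := by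
  -- reduce to i < j
  rcases Nat.lt_or_ge i j with hij | hij
  case _ =>
    have hsplit : l = l.take j ++ l.drop j := (List.take_append_drop j l).symm
    have hcnt : l.count (l.getD i 0) = (l.take j).count (l.getD i 0) + (l.drop j).count (l.getD i 0) := by
      rw [← List.count_append, List.take_append_drop]
    have h1 : 1 ≤ (l.take j).count (l.getD i 0) := by
      have hmem : l.getD i 0 ∈ l.take j := by
        rw [List.getD_eq_getElem _ _ hi]
        exact List.mem_take_iff_getElem.mpr ⟨i, by omega, rfl⟩
      have := List.count_pos_iff.mpr hmem
      omega
    have h2 : 1 ≤ (l.drop j).count (l.getD i 0) := by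
      have hmem : l.getD i 0 ∈ l.drop j := by
        rw [h, List.getD_eq_getElem _ _ hj]
        have h0 : 0 < (l.drop j).length := by
          rw [List.length_drop]; omega
        have he : (l.drop j)[0]'h0 = l[j]'hj := by
          simp [List.getElem_drop]
        rw [← he]
        exact List.getElem_mem h0
      have := List.count_pos_iff.mpr hmem
      omega
    omega
  case _ =>
    have hji : j < i := by omega
    have := pv_two_le_count l j i hj hi (by omega) h.symm
    rwa [h]

lemma pv_count_pvL (N : Nat) (v : Int) (hv : 0 < v) :
    (pvL N).count v = if v < (N : Int) then 1 else 0 := by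
  induction N with
  | zero =>
      rw [pvL]
      simp only [List.range_zero, List.map_nil, List.count_nil]
      rw [if_neg (by omega : ¬ v < ((0 : Nat) : Int))]
  | succ N ih =>
      have hsp : pvL (N + 1) = pvL N ++ [(N : Int)] := by
        simp [pvL, List.range_succ]
      rw [hsp, List.count_append, ih, List.count_singleton]
      simp only [beq_iff_eq]
      have hc : ((N + 1 : Nat) : Int) = (N : Int) + 1 := by push_cast; ring
      rw [hc]
      split_ifs <;> omega

lemma pv_count_negL (N : Nat) (v : Int) (hv : 0 < v) :
    ((pvL N).map (fun i => -i)).count v = 0 := by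
  rw [List.count_eq_zero]
  intro hmem
  rw [List.mem_map] at hmem
  obtain ⟨a, ha, hav⟩ := hmem
  rw [pvL, List.mem_map] at ha
  obtain ⟨k, _, hk⟩ := ha
  omega

-- ===== phase 1: the query loop preserves the invariant =====

lemma pv_init_inv (N : Nat) : pvInv N (pvL N) ((pvL N).map (fun i => -i)) := by
  refine ⟨by simp [pvL], by simp [pvL], ?_⟩
  intro v hv
  rw [pv_count_pvL N v hv, pv_count_negL N v hv]
  omega

lemma pv_stepA_inv {N : Nat} {top below : List Int} (hInv : pvInv N top below)
    (f t x : Int) (hf1 : -(N : Int) ≤ f) (hf2 : f < (N : Int))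
    (ht1 : -(N : Int) ≤ t) (ht2 : t < (N : Int))
    (hx1 : -(N : Int) ≤ x) (hx2 : x < (N : Int)) :
    ∃ tb : List Int × List Int,
      solveStepA (some (top, below)) (f, t, x) = some tb ∧ pvInv N tb.1 tb.2 := by
  obtain ⟨hlT, hlB, hcount⟩ := hInv
  have h0 : 0 < N := by omega
  set fm := (PySem.Int.mod f (N : Int)).toNat with hfm
  set tm := (PySem.Int.mod t (N : Int)).toNat with htm
  set xm := (PySem.Int.mod x (N : Int)).toNat with hxm
  have hfb := pv_mod_bounds h0 hf1 hf2
  have htb := pv_mod_bounds h0 ht1 ht2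
  have hxb := pv_mod_bounds h0 hx1 hx2
  have hfN : fm < N := by omega
  have htN : tm < N := by omega
  have hxN : xm < N := by omega
  refine ⟨((top.set tm (top.getD fm 0)).set fm (below.getD xm 0),
           below.set xm (top.getD tm 0)), ?_, ?_⟩
  · simp only [solveStepA, Option.bind_some]
    rw [pv_pyGet_wrap hlT h0 hf1 hf2 0, pv_pyGet_wrap hlB h0 hx1 hx2 0,
        pv_pyGet_wrap hlT h0 ht1 ht2 0]
    simp only [Option.bind_some]
    rw [pv_pySet_wrap hlT h0 ht1 ht2]
    simp only [Option.bind_some]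
    rw [pv_pySet_wrap (by simp only [List.length_set]; exact hlT) h0 hf1 hf2]
    simp only [Option.bind_some]
    rw [pv_pySet_wrap hlB h0 hx1 hx2]
    simp only [Option.bind_some, ← hfm, ← htm, ← hxm]
  · refine ⟨by simp [hlT], by simp [hlB], ?_⟩
    intro v hv
    have c1 := pv_count_set top tm (top.getD fm 0) v (by omega)
    have c2 := pv_count_set (top.set tm (top.getD fm 0)) fm (below.getD xm 0) v
      (by simp only [List.length_set]; omega)
    have c3 := pv_count_set below xm (top.getD tm 0) v (by omega)
    have htop1 : (top.set tm (top.getD fm 0)).getD fm 0 = top.getD fm 0 := by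
      by_cases hft : fm = tm
      · rw [hft]
        exact pv_getD_set_self (by omega) _ _
      · exact pv_getD_set_ne (fun hc => hft hc.symm) _ _
    rw [htop1] at c2
    have hbase := hcount v hv
    dsimp only
    split_ifs at c1 c2 c3 hbase ⊢ <;> omega

lemma pv_fold1 {n : Int} {N : Nat} (hN : (N : Int) = n + 1) :
    ∀ (qs : List (Int × Int × Int)) (top below : List Int), pvInv N top below →
    (∀ p ∈ qs, (-(n + 1) ≤ p.1 ∧ p.1 ≤ n) ∧ (-(n + 1) ≤ p.2.1 ∧ p.2.1 ≤ n) ∧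
      (-(n + 1) ≤ p.2.2 ∧ p.2.2 ≤ n)) →
    ∃ tb : List Int × List Int,
      qs.foldl solveStepA (some (top, below)) = some tb ∧ pvInv N tb.1 tb.2 := by
  intro qs
  induction qs with
  | nil => exact fun top below hInv _ => ⟨(top, below), rfl, hInv⟩
  | cons qr rest ih =>
      intro top below hInv hmem
      obtain ⟨f, t, x⟩ := qr
      have hb := hmem (f, t, x) List.mem_cons_self
      obtain ⟨tb, hstep, hInv'⟩ := pv_stepA_inv hInv f t x
        (by simp at hb; omega) (by simp at hb; omega) (by simp at hb; omega)
        (by simp at hb; omega) (by simp at hb; omega) (by simp at hb; omega)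
      rw [List.foldl_cons, hstep]
      obtain ⟨tb', hfold, hInv''⟩ := ih tb.1 tb.2 hInv'
        (fun p hp => hmem p (List.mem_cons_of_mem _ hp))
      exact ⟨tb', by rw [← hfold], hInv''⟩

-- ===== chains: distinctness, bounds, termination =====

lemma pv_val_lt {N : Nat} {top below : List Int} (hInv : pvInv N top below)
    {v : Int} (hv : 0 < v) (hc : 1 ≤ top.count v + below.count v) : v < (N : Int) := by
  have := hInv.2.2 v hv
  by_cases h : v < (N : Int)
  · exact h
  · rw [if_neg h] at this
    omega

lemma pv_chain_bound {N : Nat} {top below : List Int} (hInv : pvInv N top below)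
    {s : Int} (hs : 0 < s → 1 ≤ top.count s) {m : Nat}
    (hpos : ∀ k ≤ m, 0 < pvDown below k s) :
    ∀ k ≤ m, pvDown below k s < (N : Int) := by
  intro k hk
  induction k with
  | zero =>
      have hs0 : pvDown below 0 s = s := rfl
      rw [hs0]
      have hp0 := hpos 0 (by omega)
      rw [hs0] at hp0
      exact pv_val_lt hInv hp0 (by have := hs hp0; omega)
  | succ k ih =>
      have hklt := ih (by omega)
      have hkpos := hpos k (by omega)
      have hidx : (pvDown below k s).toNat < below.length := by
        rw [hInv.2.1]; omega
      have hcnt := pv_count_pos below (pvDown below k s).toNat hidx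
      rw [← pv_down_succ] at hcnt
      exact pv_val_lt hInv (hpos (k+1) hk) (by omega)

lemma pv_chain_nodup {N : Nat} {top below : List Int} (hInv : pvInv N top below)
    {s : Int} (hs : 0 < s → 1 ≤ top.count s) :
    ∀ (a b : Nat), a < b → (∀ k ≤ b, 0 < pvDown below k s) →
    pvDown below a s ≠ pvDown below b s := by
  intro a
  induction a with
  | zero =>
      intro b hab hpos heq
      -- s is both a top value and a below value: two slots hold it
      have hb1 : b - 1 + 1 = b := by omega
      have hbv : pvDown below b s = below.getD (pvDown below (b-1) s).toNat 0 := by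
        rw [← pv_down_succ, hb1]
      have hblt : pvDown below (b-1) s < (N : Int) :=
        pv_chain_bound hInv hs (m := b) hpos (b-1) (by omega)
      have hidx : (pvDown below (b-1) s).toNat < below.length := by
        rw [hInv.2.1]
        have := hpos (b-1) (by omega)
        omega
      have hcb := pv_count_pos below (pvDown below (b-1) s).toNat hidx
      rw [← hbv, ← heq] at hcb
      have hct := hs (hpos 0 (by omega))
      have hs0 : pvDown below 0 s = s := rfl
      rw [hs0] at hcb
      have := hInv.2.2 s (hpos 0 (by omega))
      split_ifs at this <;> omega
  | succ a ih =>
      intro b hab hpos heq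
      have hb1 : b - 1 + 1 = b := by omega
      have hav : pvDown below (a+1) s = below.getD (pvDown below a s).toNat 0 := pv_down_succ _ _ _
      have hbv : pvDown below b s = below.getD (pvDown below (b-1) s).toNat 0 := by
        rw [← pv_down_succ, hb1]
      have halt : pvDown below a s < (N : Int) :=
        pv_chain_bound hInv hs (m := b) hpos a (by omega)
      have hblt : pvDown below (b-1) s < (N : Int) :=
        pv_chain_bound hInv hs (m := b) hpos (b-1) (by omega)
      have hapos := hpos a (by omega)
      have hbpos := hpos (b-1) (by omega)
      have hidxa : (pvDown below a s).toNat < below.length := by rw [hInv.2.1]; omega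
      have hidxb : (pvDown below (b-1) s).toNat < below.length := by rw [hInv.2.1]; omega
      by_cases hii : (pvDown below a s).toNat = (pvDown below (b-1) s).toNat
      · have : pvDown below a s = pvDown below (b-1) s := by omega
        exact ih (b-1) (by omega) (fun k hk => hpos k (by omega)) this
      · have h2 := pv_two_le_count below _ _ hidxa hidxb hii
          (by rw [← hav, ← hbv, heq])
        rw [← hav] at h2
        have hc := hInv.2.2 _ (hpos (a+1) (by omega))
        split_ifs at hc <;> omega

lemma pv_chain_short {N : Nat} {top below : List Int} (hInv : pvInv N top below)
    {s : Int} (hs : 0 < s → 1 ≤ top.count s) {m : Nat}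
    (hpos : ∀ k ≤ m, 0 < pvDown below k s) : m + 2 ≤ N := by
  have hmaps : ∀ k ∈ Finset.range (m+1), pvDown below k s ∈ Finset.Ico (1 : Int) (N : Int) := by
    intro k hk
    rw [Finset.mem_range] at hk
    rw [Finset.mem_Ico]
    exact ⟨by have := hpos k (by omega); omega,
           pv_chain_bound hInv hs hpos k (by omega)⟩
  have hinj : Set.InjOn (fun k => pvDown below k s) (Finset.range (m+1)) := by
    intro a ha b hb hab
    simp only [Finset.coe_range, Set.mem_Iio] at ha hb
    by_contra hne
    rcases Nat.lt_or_ge a b with h | h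
    · exact pv_chain_nodup hInv hs a b h (fun k hk => hpos k (by omega)) hab
    · exact pv_chain_nodup hInv hs b a (by omega) (fun k hk => hpos k (by omega)) hab.symm
  have hcard := Finset.card_le_card_of_injOn _ hmaps hinj
  rw [Finset.card_range] at hcard
  have : (Finset.Ico (1 : Int) (N : Int)).card = ((N : Int) - 1).toNat := Int.card_Ico 1 (N : Int)
  omega

lemma pv_chain_ends {N : Nat} {top below : List Int} (hInv : pvInv N top below)
    {s : Int} (hs : 0 < s → 1 ≤ top.count s) (h0 : 0 < N) :
    ∃ M, M < N ∧ pvDown below M s ≤ 0 := by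
  by_contra h
  push_neg at h
  have hpos : ∀ k ≤ N - 1, 0 < pvDown below k s := by
    intro k hk
    exact h k (by omega)
  have := pv_chain_short hInv hs hpos
  omega

-- ===== B's inverse tables =====

lemma pv_invB_fold {n : Int} {N : Nat} (hN : (N : Int) = n + 1)
    {top below : List Int} (hInv : pvInv N top below) :
    ∃ tt ca : PySem.Dict Int Int,
      (PySem.List.pyRange 1 (n + 1) 1).foldl (solveInvB top below)
          (some (PySem.Dict.empty, PySem.Dict.empty)) = some (tt, ca) ∧
      pvHtt N top tt ∧ pvHca N below ca := by
  have haux : ∀ (P : List Int), (∀ j ∈ P, 1 ≤ j ∧ j < (N : Int)) →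
      ∃ tt ca : PySem.Dict Int Int,
        P.foldl (solveInvB top below) (some (PySem.Dict.empty, PySem.Dict.empty)) = some (tt, ca) ∧
        (∀ v j : Int, tt.get? v = some j ↔ (0 < v ∧ j ∈ P ∧ top.getD j.toNat 0 = v)) ∧
        (∀ v p : Int, ca.get? v = some p ↔ (0 < v ∧ p ∈ P ∧ below.getD p.toNat 0 = v)) := by
    intro P
    induction P using List.reverseRecOn with
    | nil =>
        intro _
        refine ⟨PySem.Dict.empty, PySem.Dict.empty, rfl, ?_, ?_⟩ <;>
          · intro v j
            simp [PySem.Dict.get?_empty]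
    | append_singleton P i ih =>
        intro hbnd
        have hbndP : ∀ j ∈ P, 1 ≤ j ∧ j < (N : Int) :=
          fun j hj => hbnd j (List.mem_append_left _ hj)
        have hbi := hbnd i (List.mem_append_right _ (List.mem_singleton_self i))
        obtain ⟨tt, ca, hfold, htt, hca⟩ := ih hbndP
        have hidxT : i.toNat < top.length := by rw [hInv.1]; omega
        have hidxB : i.toNat < below.length := by rw [hInv.2.1]; omega
        refine ⟨(if 0 < top.getD i.toNat 0 then tt.insert (top.getD i.toNat 0) i else tt),
                (if 0 < below.getD i.toNat 0 then ca.insert (below.getD i.toNat 0) i else ca),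
                ?_, ?_, ?_⟩
        · rw [List.foldl_append, hfold]
          simp only [List.foldl_cons, List.foldl_nil, solveInvB, Option.bind_some]
          rw [pv_pyGet (by omega) hidxT 0, pv_pyGet (by omega) hidxB 0]
          simp only [Option.bind_some]
        · -- top-table characterization
          intro v j
          constructor
          · intro hget
            by_cases htv : 0 < top.getD i.toNat 0
            · rw [if_pos htv, PySem.Dict.get?_insert] at hget
              by_cases hv : v = top.getD i.toNat 0
              · rw [if_pos hv] at hget
                obtain rfl : i = j := by injection hget
                exact ⟨by omega, List.mem_append_right _ (List.mem_singleton_self i), hv.symm⟩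
              · rw [if_neg hv] at hget
                obtain ⟨h1, h2, h3⟩ := (htt v j).mp hget
                exact ⟨h1, List.mem_append_left _ h2, h3⟩
            · rw [if_neg htv] at hget
              obtain ⟨h1, h2, h3⟩ := (htt v j).mp hget
              exact ⟨h1, List.mem_append_left _ h2, h3⟩
          · rintro ⟨h1, h2, h3⟩
            rcases List.mem_append.mp h2 with hjP | hji
            · -- j was already registered; the value v cannot also be table i's top
              have hofold := (htt v j).mpr ⟨h1, hjP, h3⟩
              by_cases htv : 0 < top.getD i.toNat 0
              · rw [if_pos htv, PySem.Dict.get?_insert]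
                by_cases hv : v = top.getD i.toNat 0
                · rw [if_pos hv]
                  have hbj := hbndP j hjP
                  by_cases hij : j = i
                  · rw [hij]
                  · -- two distinct top slots would both hold v
                    exfalso
                    have hij' : j.toNat ≠ i.toNat := by omega
                    have h2c := pv_two_le_count top j.toNat i.toNat
                      (by rw [hInv.1]; omega) hidxT hij' (by rw [h3, hv])
                    rw [h3] at h2c
                    have := hInv.2.2 v h1
                    split_ifs at this <;> omega
                · rw [if_neg hv]
                  exact hofold
              · rw [if_neg htv]
                exact hofold
            · have hji' : j = i := List.mem_singleton.mp hji
              subst hji'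
              have htv : 0 < top.getD j.toNat 0 := by rw [h3]; exact h1
              rw [if_pos htv, PySem.Dict.get?_insert, if_pos h3.symm]
        · -- carrier characterization
          intro v p
          constructor
          · intro hget
            by_cases hbv : 0 < below.getD i.toNat 0
            · rw [if_pos hbv, PySem.Dict.get?_insert] at hget
              by_cases hv : v = below.getD i.toNat 0
              · rw [if_pos hv] at hget
                obtain rfl : i = p := by injection hget
                exact ⟨by omega, List.mem_append_right _ (List.mem_singleton_self i), hv.symm⟩
              · rw [if_neg hv] at hget
                obtain ⟨h1, h2, h3⟩ := (hca v p).mp hget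
                exact ⟨h1, List.mem_append_left _ h2, h3⟩
            · rw [if_neg hbv] at hget
              obtain ⟨h1, h2, h3⟩ := (hca v p).mp hget
              exact ⟨h1, List.mem_append_left _ h2, h3⟩
          · rintro ⟨h1, h2, h3⟩
            rcases List.mem_append.mp h2 with hpP | hpi
            · have hofold := (hca v p).mpr ⟨h1, hpP, h3⟩
              by_cases hbv : 0 < below.getD i.toNat 0
              · rw [if_pos hbv, PySem.Dict.get?_insert]
                by_cases hv : v = below.getD i.toNat 0
                · rw [if_pos hv]
                  have hbp := hbndP p hpP
                  by_cases hip : p = i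
                  · rw [hip]
                  · exfalso
                    have hip' : p.toNat ≠ i.toNat := by omega
                    have h2c := pv_two_le_count below p.toNat i.toNat
                      (by rw [hInv.2.1]; omega) hidxB hip' (by rw [h3, hv])
                    rw [h3] at h2c
                    have := hInv.2.2 v h1
                    split_ifs at this <;> omega
                · rw [if_neg hv]
                  exact hofold
              · rw [if_neg hbv]
                exact hofold
            · have hpi' : p = i := List.mem_singleton.mp hpi
              subst hpi'
              have hbv : 0 < below.getD p.toNat 0 := by rw [h3]; exact h1
              rw [if_pos hbv, PySem.Dict.get?_insert, if_pos h3.symm]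
  have hrange : ∀ j : Int, j ∈ PySem.List.pyRange 1 (n + 1) 1 ↔ (1 ≤ j ∧ j < (N : Int)) := by
    intro j
    rw [PySem.List.mem_pyRange_one]
    omega
  obtain ⟨tt, ca, hfold, htt, hca⟩ := haux (PySem.List.pyRange 1 (n + 1) 1)
    (fun j hj => (hrange j).mp hj)
  refine ⟨tt, ca, hfold, ?_, ?_⟩
  · intro v j
    rw [htt v j, hrange j]
    tauto
  · intro v p
    rw [hca v p, hrange p]
    tauto

-- ===== the climb computes each element's pile =====

lemma pv_climb_chain {N : Nat} {top below : List Int} (hInv : pvInv N top below)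
    {tt ca : PySem.Dict Int Int} (htt : pvHtt N top tt) (hca : pvHca N below ca)
    {i : Int} (hi1 : 1 ≤ i) (hi2 : i < (N : Int)) :
    ∀ (m F : Nat) (e : Int), F ≥ m →
    (∀ k ≤ m, 0 < pvDown below k (top.getD i.toNat 0)) →
    pvDown below m (top.getD i.toNat 0) = e →
    climbB tt ca F e = top.getD i.toNat 0 := by
  have hs : 0 < top.getD i.toNat 0 → 1 ≤ top.count (top.getD i.toNat 0) :=
    fun _ => pv_count_pos top i.toNat (by rw [hInv.1]; omega)
  intro m
  induction m with
  | zero =>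
      intro F e _ hpos he
      have he' : top.getD i.toNat 0 = e := he
      have hget : tt.get? e = some i := by
        rw [(htt e i)]
        refine ⟨?_, hi1, hi2, he'⟩
        have h0 := hpos 0 (by omega)
        rw [← he']
        exact h0
      have hcont : tt.contains e = true := by
        rw [PySem.Dict.contains_eq_isSome_get?, hget]
        rfl
      cases F with
      | zero => exact he'.symm
      | succ F => simp only [climbB, hcont, if_true]; exact he'.symm
  | succ m ih =>
      intro F e hF hpos he
      obtain ⟨F', rfl⟩ : ∃ F', F = F' + 1 := ⟨F - 1, by omega⟩
      have hc' : pvDown below m (top.getD i.toNat 0) = pvDown below m (top.getD i.toNat 0) := rfl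
      set c' := pvDown below m (top.getD i.toNat 0) with hc'def
      have hcpos : 0 < c' := hpos m (by omega)
      have hclt : c' < (N : Int) := pv_chain_bound hInv hs hpos m (by omega)
      have hbel : below.getD c'.toNat 0 = e := by
        rw [← he, pv_down_succ]
      have hepos : 0 < e := by
        have := hpos (m + 1) (by omega)
        rwa [he] at this
      have hcaE : ca.get? e = some c' := by
        rw [(hca e c')]
        exact ⟨hepos, by omega, hclt, hbel⟩
      have httE : tt.get? e = none := by
        cases hgt : tt.get? e with
        | none => rfl
        | some j =>
            exfalso
            obtain ⟨_, hj1, hj2, hjv⟩ := (htt e j).mp hgt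
            have hcT : 1 ≤ top.count e := by
              have := pv_count_pos top j.toNat (by rw [hInv.1]; omega)
              rwa [hjv] at this
            have hcB : 1 ≤ below.count e := by
              have := pv_count_pos below c'.toNat (by rw [hInv.2.1]; omega)
              rwa [hbel] at this
            have := hInv.2.2 e hepos
            split_ifs at this <;> omega
      have hcont : tt.contains e = false := by
        rw [PySem.Dict.contains_eq_isSome_get?, httE]
        rfl
      simp only [climbB, hcont, Bool.false_eq_true, if_false, hcaE]
      exact ih F' c' (by omega) (fun k hk => hpos k (by omega)) rfl

lemma pv_climb_to_chain {N : Nat} {top below : List Int} (hInv : pvInv N top below)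
    {tt ca : PySem.Dict Int Int} (htt : pvHtt N top tt) (hca : pvHca N below ca) :
    ∀ (F : Nat) (e : Int), 0 < e → tt.contains (climbB tt ca F e) = true →
    ∃ i, pvOn N top below i e := by
  intro F
  induction F with
  | zero =>
      intro e he hcont
      rw [PySem.Dict.contains_eq_isSome_get?] at hcont
      obtain ⟨i, hget⟩ := Option.isSome_iff_exists.mp hcont
      obtain ⟨_, hi1, hi2, hiv⟩ := (htt e i).mp hget
      exact ⟨i, hi1, hi2, 0, fun k hk => by
        have : k = 0 := by omega
        subst this
        show 0 < top.getD i.toNat 0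
        rw [hiv]; exact he, hiv⟩
  | succ F ih =>
      intro e he hcont
      by_cases hce : tt.contains e = true
      · rw [PySem.Dict.contains_eq_isSome_get?] at hce
        obtain ⟨i, hget⟩ := Option.isSome_iff_exists.mp hce
        obtain ⟨_, hi1, hi2, hiv⟩ := (htt e i).mp hget
        exact ⟨i, hi1, hi2, 0, fun k hk => by
          have : k = 0 := by omega
          subst this
          show 0 < top.getD i.toNat 0
          rw [hiv]; exact he, hiv⟩
      · have hce' : tt.contains e = false := by
          cases h : tt.contains e
          · rfl
          · exact absurd h hce
        cases hg : ca.get? e with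
        | none =>
            simp only [climbB, hce', Bool.false_eq_true, if_false, hg] at hcont
        | some p =>
            simp only [climbB, hce', Bool.false_eq_true, if_false, hg] at hcont
            obtain ⟨_, hp1, hp2, hpv⟩ := (hca e p).mp hg
            obtain ⟨i, hi1, hi2, m, hpos, hm⟩ := ih p (by omega) hcont
            refine ⟨i, hi1, hi2, m + 1, ?_, ?_⟩
            · intro k hk
              rcases Nat.lt_or_ge k (m + 1) with h | h
              · exact hpos k (by omega)
              · have : k = m + 1 := by omega
                subst this
                rw [pv_down_succ, hm, hpv]
                exact he
            · rw [pv_down_succ, hm, hpv]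

lemma pv_label_of_chain {N : Nat} {top below : List Int} (hInv : pvInv N top below)
    {tt ca : PySem.Dict Int Int} (htt : pvHtt N top tt) (hca : pvHca N below ca)
    {i e : Int} (hOn : pvOn N top below i e) :
    tt.getD (climbB tt ca (N - 1) e) e = i := by
  obtain ⟨hi1, hi2, m, hpos, hm⟩ := hOn
  have hs : 0 < top.getD i.toNat 0 → 1 ≤ top.count (top.getD i.toNat 0) :=
    fun _ => pv_count_pos top i.toNat (by rw [hInv.1]; omega)
  have hshort := pv_chain_short hInv hs hpos
  have hclimb := pv_climb_chain hInv htt hca hi1 hi2 m (N - 1) e (by omega) hpos hm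
  rw [hclimb]
  have hget : tt.get? (top.getD i.toNat 0) = some i := by
    rw [(htt _ i)]
    exact ⟨hpos 0 (by omega), hi1, hi2, rfl⟩
  exact PySem.Dict.getD_of_get?_eq_some tt e hget

lemma pv_label_of_nochain {N : Nat} {top below : List Int} (hInv : pvInv N top below)
    {tt ca : PySem.Dict Int Int} (htt : pvHtt N top tt) (hca : pvHca N below ca)
    {e : Int} (he : 0 < e) (hno : ¬ ∃ i, pvOn N top below i e) :
    tt.getD (climbB tt ca (N - 1) e) e = e := by
  cases hc : tt.contains (climbB tt ca (N - 1) e) with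
  | false => exact PySem.Dict.getD_of_not_contains tt e hc
  | true => exact absurd (pv_climb_to_chain hInv htt hca (N - 1) e he hc) hno

-- ===== A's walks =====

lemma pv_while_pos (below res : List Int) (i p : Int) (fuel : Nat) (hp : 0 < p) :
    solveWhileA below i (fuel + 1) res p =
      (PySem.List.pySet? res p i).bind (fun res' =>
        (PySem.List.pyGet? below p).bind (fun p' => solveWhileA below i fuel res' p')) := by
  simp only [solveWhileA, if_pos hp]
  cases PySem.List.pySet? res p i <;> cases PySem.List.pyGet? below p <;> rfl

lemma pv_while_neg (below res : List Int) (i p : Int) (fuel : Nat) (hp : ¬ 0 < p) :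
    solveWhileA below i (fuel + 1) res p = some res := by
  simp only [solveWhileA, if_neg hp]

lemma pv_walk_mono (below : List Int) (i : Int) :
    ∀ (fuel : Nat) (res r : List Int) (p : Int),
    solveWhileA below i fuel res p = some r →
    ∀ fuel', fuel ≤ fuel' → solveWhileA below i fuel' res p = some r := by
  intro fuel
  induction fuel with
  | zero => intro res r p h; cases h
  | succ f ih =>
      intro res r p h fuel' hf
      obtain ⟨f', rfl⟩ : ∃ f', fuel' = f' + 1 := ⟨fuel' - 1, by omega⟩
      by_cases hp : 0 < p
      · rw [pv_while_pos _ _ _ _ _ hp] at h ⊢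
        cases hset : PySem.List.pySet? res p i with
        | none => rw [hset] at h; simp at h
        | some res' =>
            rw [hset] at h
            simp only [Option.bind_some] at h ⊢
            cases hget : PySem.List.pyGet? below p with
            | none => rw [hget] at h; simp at h
            | some p' =>
                rw [hget] at h
                simp only [Option.bind_some] at h ⊢
                exact ih _ _ _ h f' (by omega)
      · rw [pv_while_neg _ _ _ _ _ hp] at h ⊢
        exact h

lemma pv_walk {N : Nat} {top below : List Int} (hInv : pvInv N top below)
    {i s : Int} (hs : 0 < s → 1 ≤ top.count s) {M : Nat}
    (hMpos : ∀ k < M, 0 < pvDown below k s) (hMend : pvDown below M s ≤ 0) :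
    ∀ (d k : Nat), M - k = d → k ≤ M → ∀ res : List Int, res.length = N →
    ∃ res', solveWhileA below i (M - k + 1) res (pvDown below k s) = some res' ∧
      res'.length = N ∧
      ∀ j : Nat, j < N →
        ((∃ m, k ≤ m ∧ m < M ∧ pvDown below m s = (j : Int)) → res'.getD j 0 = i) ∧
        ((¬ ∃ m, k ≤ m ∧ m < M ∧ pvDown below m s = (j : Int)) → res'.getD j 0 = res.getD j 0) := by
  intro d
  induction d with
  | zero =>
      intro k hdk hkM res hres
      have hk : k = M := by omega
      rw [show M - k + 1 = 0 + 1 from by omega]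
      refine ⟨res, by rw [hk]; exact pv_while_neg _ _ _ _ _ (by omega), hres, ?_⟩
      intro j hj
      constructor
      · rintro ⟨m, hm1, hm2, _⟩
        omega
      · intro _
        rfl
  | succ d ih =>
      intro k hdk hkM res hres
      have hkM' : k < M := by omega
      have hpos := hMpos k hkM'
      have hbnd : ∀ k' ≤ M - 1, 0 < pvDown below k' s := fun k' hk' => hMpos k' (by omega)
      have hklt : pvDown below k s < (N : Int) := pv_chain_bound hInv hs hbnd k (by omega)
      have hset : PySem.List.pySet? res (pvDown below k s) i
          = some (res.set (pvDown below k s).toNat i) :=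
        pv_pySet (by omega) (by rw [hres]; omega) i
      have hget : PySem.List.pyGet? below (pvDown below k s) = some (pvDown below (k + 1) s) := by
        rw [pv_pyGet (by omega) (by rw [hInv.2.1]; omega) 0, pv_down_succ]
      obtain ⟨res', hrun, hlen', hstamp⟩ := ih (k + 1) (by omega) (by omega)
        (res.set (pvDown below k s).toNat i) (by simp [hres])
      refine ⟨res', ?_, hlen', ?_⟩
      · rw [show M - k + 1 = (M - (k + 1) + 1) + 1 from by omega,
            pv_while_pos _ _ _ _ _ hpos, hset]
        simp only [Option.bind_some]
        rw [hget]
        simp only [Option.bind_some]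
        exact hrun
      · intro j hj
        have hsj := hstamp j hj
        constructor
        · rintro ⟨m, hm1, hm2, hm3⟩
          by_cases hlater : ∃ m', k + 1 ≤ m' ∧ m' < M ∧ pvDown below m' s = (j : Int)
          · exact hsj.1 hlater
          · have hmk : m = k := by
              by_contra hc
              exact hlater ⟨m, by omega, hm2, hm3⟩
            subst hmk
            rw [hsj.2 hlater]
            have hjt : (pvDown below m s).toNat = j := by omega
            rw [hjt]
            exact pv_getD_set_self (by rw [hres]; omega) _ _
        · intro hno
          have hno' : ¬ ∃ m', k + 1 ≤ m' ∧ m' < M ∧ pvDown below m' s = (j : Int) :=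
            fun ⟨m', h1, h2, h3⟩ => hno ⟨m', by omega, h2, h3⟩
          rw [hsj.2 hno']
          have hjk : (pvDown below k s).toNat ≠ j := by
            intro hc
            exact hno ⟨k, le_refl _, hkM', by omega⟩
          exact pv_getD_set_ne hjk _ _

-- ===== the extraction loop =====

lemma pv_extr_fold {n : Int} {N : Nat} (hN : (N : Int) = n + 1)
    {top below : List Int} (hInv : pvInv N top below)
    {tt ca : PySem.Dict Int Int} (htt : pvHtt N top tt) (hca : pvHca N below ca) :
    ∀ (P : List Int), (∀ i ∈ P, 1 ≤ i ∧ i < (N : Int)) →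
    ∃ res', P.foldl (solveExtrA top below) (some (pvL N)) = some res' ∧ res'.length = N ∧
    ∀ j : Nat, 1 ≤ j → j < N →
      ((∃ i, i ∈ P ∧ pvOn N top below i (j : Int)) →
        res'.getD j 0 = tt.getD (climbB tt ca (N - 1) (j : Int)) (j : Int)) ∧
      ((¬ ∃ i, i ∈ P ∧ pvOn N top below i (j : Int)) → res'.getD j 0 = (j : Int)) := by
  intro P
  induction P using List.reverseRecOn with
  | nil =>
      intro _
      refine ⟨pvL N, rfl, by simp [pvL], ?_⟩
      intro j h1 h2
      constructor
      · rintro ⟨i, hmem, _⟩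
        cases hmem
      · intro _
        exact pv_getD_pvL h2 0
  | append_singleton P i ih =>
      intro hbnd
      have hbndP : ∀ i' ∈ P, 1 ≤ i' ∧ i' < (N : Int) :=
        fun i' hi' => hbnd i' (List.mem_append_left _ hi')
      have hbi := hbnd i (List.mem_append_right _ (List.mem_singleton_self i))
      have h0 : 0 < N := by omega
      obtain ⟨res', hfold, hlen', hres'⟩ := ih hbndP
      have hidxT : i.toNat < top.length := by rw [hInv.1]; omega
      have hgetT : PySem.List.pyGet? top i = some (top.getD i.toNat 0) :=
        pv_pyGet (by omega) hidxT 0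
      rw [List.foldl_append, hfold]
      simp only [List.foldl_cons, List.foldl_nil, solveExtrA, Option.bind_some, hgetT]
      by_cases htv : 0 < top.getD i.toNat 0
      · -- table i has a pile: the walk stamps exactly its chain
        have hs : 0 < top.getD i.toNat 0 → 1 ≤ top.count (top.getD i.toNat 0) :=
          fun _ => pv_count_pos top i.toNat hidxT
        have hex : ∃ M, pvDown below M (top.getD i.toNat 0) ≤ 0 := by
          obtain ⟨M0, _, hM0⟩ := pv_chain_ends hInv hs h0
          exact ⟨M0, hM0⟩
        set M := Nat.find hex with hMdef
        have hMend : pvDown below M (top.getD i.toNat 0) ≤ 0 := Nat.find_spec hex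
        have hMpos : ∀ k < M, 0 < pvDown below k (top.getD i.toNat 0) := by
          intro k hk
          have := Nat.find_min hex hk
          omega
        have hMlt : M < N := by
          obtain ⟨M0, hM0lt, hM0⟩ := pv_chain_ends hInv hs h0
          have := Nat.find_min' hex hM0
          omega
        obtain ⟨res'', hrun, hlen'', hstamp⟩ :=
          pv_walk hInv hs hMpos hMend (M - 0) 0 rfl (by omega) res' hlen'
        have hrun' : solveWhileA below i (below.length + 1) res' (top.getD i.toNat 0)
            = some res'' := by
          have := pv_walk_mono below i _ _ _ _ hrun (below.length + 1)
            (by rw [hInv.2.1]; omega)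
          exact this
        refine ⟨res'', hrun', hlen'', ?_⟩
        have hOn_of_S : ∀ j : Nat, (∃ m, 0 ≤ m ∧ m < M ∧
            pvDown below m (top.getD i.toNat 0) = (j : Int)) → pvOn N top below i (j : Int) := by
          rintro j ⟨m, _, hmM, hmj⟩
          exact ⟨hbi.1, hbi.2, m, fun k hk => hMpos k (by omega), hmj⟩
        have hS_of_On : ∀ j : Nat, pvOn N top below i (j : Int) → (∃ m, 0 ≤ m ∧ m < M ∧
            pvDown below m (top.getD i.toNat 0) = (j : Int)) := by
          rintro j ⟨_, _, m, hpos, hm⟩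
          refine ⟨m, by omega, ?_, hm⟩
          by_contra hc
          have := hpos M (by omega)
          omega
        intro j h1 h2
        have hst := hstamp j h2
        constructor
        · rintro ⟨i', hmem', hOn'⟩
          by_cases hS : ∃ m, 0 ≤ m ∧ m < M ∧ pvDown below m (top.getD i.toNat 0) = (j : Int)
          · rw [hst.1 hS]
            exact (pv_label_of_chain hInv htt hca (hOn_of_S j hS)).symm
          · rw [hst.2 hS]
            rcases List.mem_append.mp hmem' with hP | hi'
            · exact (hres' j h1 h2).1 ⟨i', hP, hOn'⟩
            · exfalso
              rw [List.mem_singleton.mp hi'] at hOn'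
              exact hS (hS_of_On j hOn')
        · intro hno
          have hS : ¬ ∃ m, 0 ≤ m ∧ m < M ∧ pvDown below m (top.getD i.toNat 0) = (j : Int) :=
            fun hS => hno ⟨i, List.mem_append_right _ (List.mem_singleton_self i), hOn_of_S j hS⟩
          rw [hst.2 hS]
          exact (hres' j h1 h2).2 (fun ⟨i', hP, hOn'⟩ =>
            hno ⟨i', List.mem_append_left _ hP, hOn'⟩)
      · -- empty pile: the walk is a no-op and table i owns no element
        have hnoop : solveWhileA below i (below.length + 1) res' (top.getD i.toNat 0)
            = some res' := pv_while_neg _ _ _ _ _ htv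
        refine ⟨res', hnoop, hlen', ?_⟩
        intro j h1 h2
        have hiOn : ¬ pvOn N top below i (j : Int) := by
          rintro ⟨_, _, m, hpos, _⟩
          exact htv (hpos 0 (by omega))
        constructor
        · rintro ⟨i', hmem', hOn'⟩
          rcases List.mem_append.mp hmem' with hP | hi'
          · exact (hres' j h1 h2).1 ⟨i', hP, hOn'⟩
          · exfalso
            rw [List.mem_singleton.mp hi'] at hOn'
            exact hiOn hOn'
        · intro hno
          exact (hres' j h1 h2).2 (fun ⟨i', hP, hOn'⟩ =>
            hno ⟨i', List.mem_append_left _ hP, hOn'⟩)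

-- ===== VERDICT (by name: the statement is the Claim_ definition above) =====
theorem solve_spec : Claim_equal_solve := by
  unfold Claim_equal_solve
  intro n q qs hDom hPre
  unfold Spec_solve
  unfold Pre_solve at hPre
  by_cases hn : 0 ≤ n
  · set N := (n + 1).toNat with hNdef
    have hN : (N : Int) = n + 1 := by omega
    have h0 : 0 < N := by omega
    simp only [solve, solve_alt]
    rw [pv_range_eq hn, ← hNdef]
    have hqs : ∀ p ∈ qs, (-(n + 1) ≤ p.1 ∧ p.1 ≤ n) ∧ (-(n + 1) ≤ p.2.1 ∧ p.2.1 ≤ n) ∧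
        (-(n + 1) ≤ p.2.2 ∧ p.2.2 ≤ n) := hPre
    obtain ⟨⟨top, below⟩, hfold1, hInv⟩ := pv_fold1 (n := n) (N := N) hN qs (pvL N)
      ((pvL N).map (fun i => -i)) (pv_init_inv N) hqs
    simp only [hfold1]
    obtain ⟨tt, ca, hfold2, htt, hca⟩ := pv_invB_fold (n := n) hN hInv
    simp only [hfold2]
    obtain ⟨res', hfold3, hlen', hres'⟩ := pv_extr_fold hN hInv htt hca
      (PySem.List.pyRange 1 (n + 1) 1)
      (fun i hi => by rw [PySem.List.mem_pyRange_one] at hi; constructor <;> omega)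
    simp only [hfold3]
    -- both outputs, element by element
    rw [PySem.List.slice_from_one]
    apply List.ext_getElem
    · simp [hlen', PySem.List.length_pyRange_one]
      omega
    · intro k hk1 hk2
      have hkN : k + 1 < N := by
        simp [hlen'] at hk1
        omega
      have hlhs : res'.tail[k]'hk1 = res'.getD (k + 1) 0 := by
        rw [List.getElem_tail, List.getD_eq_getElem _ _ (by omega)]
      have hrhs : ∀ (f : Int → Int) (hkr : k < ((PySem.List.pyRange 1 (n + 1) 1).map f).length),
          ((PySem.List.pyRange 1 (n + 1) 1).map f)[k]'hkr = f (1 + (k : Int)) := by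
        intro f hkr
        rw [List.getElem_map, PySem.List.getElem_pyRange_one]
      rw [hlhs, hrhs]
      have hcast : 1 + (k : Int) = ((k + 1 : Nat) : Int) := by push_cast; ring
      have hfuel : n.toNat = N - 1 := by omega
      rw [hcast, hfuel]
      have hcl := hres' (k + 1) (by omega) hkN
      by_cases hex : ∃ i, i ∈ PySem.List.pyRange 1 (n + 1) 1 ∧
          pvOn N top below i ((k + 1 : Nat) : Int)
      · exact hcl.1 hex
      · rw [hcl.2 hex]
        refine (pv_label_of_nochain hInv htt hca (by push_cast; omega) ?_).symm
        rintro ⟨i, hOn⟩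
        exact hex ⟨i, by
          rw [PySem.List.mem_pyRange_one]
          obtain ⟨hi1, hi2, _⟩ := hOn
          constructor <;> omega, hOn⟩
  · -- n < 0: the precondition forces an empty query list; both sides are []
    cases qs with
    | nil =>
        simp only [solve, solve_alt, List.foldl_nil]
        rw [PySem.List.pyRange_one_eq_nil (by omega : n + 1 ≤ 1)]
        simp only [List.foldl_nil, List.map_nil]
        rw [PySem.List.pyRange_one_eq_nil (by omega : n + 1 ≤ 0)]
        rfl
    | cons qr rest =>
        exfalso
        obtain ⟨⟨hA, hB⟩, -⟩ := hPre qr List.mem_cons_self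
        omega
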